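-- pv_equiv track=rewrite | github.com/inaciovasquez2020/pachner-invariant | tools/g2_enumerator.py | bounded_pachner_enumeration
-- ===== SOURCE A (Python) =====
-- from itertools import combinations
-- from collections import defaultdict, deque
--
-- class FlipGraph:
--     def __init__(self):
--         self.nodes = set()
--         self.adj = defaultdict(set)
--
--     def add_node(self, x):
--         self.nodes.add(x)
--         self.adj.setdefault(x, set())
--
--     def add_edge(self, x, y):
--         self.nodes.add(x)
--         self.nodes.add(y)
--         self.adj.setdefault(x, set())
--         self.adj.setdefault(y, set())
--         self.adj[x].add(y)
--         self.adj[y].add(x)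
--
-- def Fn(n: int) -> FlipGraph:
--     G = FlipGraph()
--     verts = list(range(n))
--
--     states = list(combinations(verts, 3))
--
--     for s in states:
--         G.add_node(s)
--
--     for i, a in enumerate(states):
--         for b in states[i + 1:]:
--             if len(set(a).intersection(set(b))) == 2:
--                 G.add_edge(a, b)
--
--     return G
--
-- def connected_components(G: FlipGraph):
--     seen = set()
--     comps = 0
--
--     for v in G.nodes:
--         if v in seen:
--             continue
--         comps += 1
--         q = deque([v])
--         seen.add(v)
--         while q:
--             x = q.popleft()
--             for y in G.adj[x]:
--                 if y not in seen:
--                     seen.add(y)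
--                     q.append(y)
--
--     return comps
--
-- def cycle_rank(G: FlipGraph):
--     V = len(G.nodes)
--     E = sum(len(v) for v in G.adj.values()) // 2
--     C = connected_components(G)
--     return E - V + C
--
-- def bounded_pachner_enumeration(n: int):
--     G = Fn(n)
--     return {
--         "n": n,
--         "V": len(G.nodes),
--         "E": sum(len(v) for v in G.adj.values()) // 2,
--         "C": connected_components(G),
--         "cycle_rank": cycle_rank(G),
--     }
-- ===== SOURCE B (Python) =====
-- def bounded_pachner_enumeration(n: int):
--     # Closed form: the flip graph on 3-subsets of range(n) is the Johnson graph J(n,3):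
--     # V = C(n,3), every vertex has degree 3*(n-3), and the graph is connected for n >= 3.
--     V = n * (n - 1) * (n - 2) // 6 if n >= 3 else 0
--     E = V * 3 * (n - 3) // 2
--     C = 1 if n >= 3 else 0
--     return {
--         "n": n,
--         "V": V,
--         "E": E,
--         "C": C,
--         "cycle_rank": E - V + C,
--     }
-- ===== Notes on version B (the rewrite author's own statement) =====
-- stated objective: simpler
-- what changed: Replaces building the flip graph (the all-pairs set-intersection edge loop plus BFS component search) by the closed-form counts of the Johnson graph J(n,3): V=C(n,3), E=V*3*(n-3)/2, C=1 when at least one triple exists (else 0), cycle_rank=E-V+C; intended as asymptotically faster (O(1) vs O(n^6)), claimed here only as simpler since A times out before a timing run can reliably compare them.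
import Mathlib
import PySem

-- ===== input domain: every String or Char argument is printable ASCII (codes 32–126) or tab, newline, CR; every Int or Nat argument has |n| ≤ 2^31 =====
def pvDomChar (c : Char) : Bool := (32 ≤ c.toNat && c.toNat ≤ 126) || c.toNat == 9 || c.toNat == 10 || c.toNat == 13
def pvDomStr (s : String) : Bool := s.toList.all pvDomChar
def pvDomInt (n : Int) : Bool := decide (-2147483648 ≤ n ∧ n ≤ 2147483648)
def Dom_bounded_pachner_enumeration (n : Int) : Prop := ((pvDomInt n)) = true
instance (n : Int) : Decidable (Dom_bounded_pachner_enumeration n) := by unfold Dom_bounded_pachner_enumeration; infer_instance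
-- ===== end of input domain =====

-- B replaces A's graph construction and BFS by the closed-form counts of the Johnson graph J(n,3).

-- ===== PORT A =====
-- itertools.combinations(verts, 2) / (verts, 3) in lexicographic order
def pvPairs2 : List Int → List (Int × Int)
  | [] => []
  | x :: xs => (xs.map fun y => (x, y)) ++ pvPairs2 xs

def pvCombos3 : List Int → List (Int × Int × Int)
  | [] => []
  | x :: xs => ((pvPairs2 xs).map fun p => (x, p.1, p.2)) ++ pvCombos3 xs

-- FlipGraph: (nodes as a Python set, adj as dict of sets)
abbrev PvT3 := Int × Int × Int
abbrev PvGraph := (PySem.Set PvT3) × (PySem.Dict PvT3 (PySem.Set PvT3))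

def pvAddNode (g : PvGraph) (x : PvT3) : PvGraph :=
  (PySem.Set.add g.1 x, g.2.setdefault x [])

def pvAddEdge (g : PvGraph) (x y : PvT3) : PvGraph :=
  let nodes := PySem.Set.add (PySem.Set.add g.1 x) y
  let d := (g.2.setdefault x []).setdefault y []
  let d := d.modify x [] (fun s => PySem.Set.add s y)
  let d := d.modify y [] (fun s => PySem.Set.add s x)
  (nodes, d)

-- len(set(a).intersection(set(b)))
def pvInterLen (a b : PvT3) : Int :=
  PySem.Set.len (PySem.Set.inter (PySem.Set.ofList [a.1, a.2.1, a.2.2])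
                                 (PySem.Set.ofList [b.1, b.2.1, b.2.2]))

def pvFn (n : Int) : PvGraph :=
  let verts := PySem.List.pyRange 0 n 1
  let states := pvCombos3 verts
  let g := states.foldl (fun g s => pvAddNode g s) (([] : PySem.Set PvT3), PySem.Dict.empty)
  (PySem.List.enumerate states).foldl
    (fun g ia =>
      (PySem.List.slice states (some (ia.1 + 1)) none).foldl
        (fun g b => if pvInterLen ia.2 b == 2 then pvAddEdge g ia.2 b else g) g)
    g

-- BFS while-loop; fuel only makes the recursion structural (the proofs show it never runs out)
def pvBfs (adj : PySem.Dict PvT3 (PySem.Set PvT3)) : Nat → List PvT3 → PySem.Set PvT3 → PySem.Set PvT3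
  | 0, _, seen => seen
  | _, [], seen => seen
  | fuel + 1, x :: q, seen =>
      let st := (adj.getD x []).foldl
        (fun (p : List PvT3 × PySem.Set PvT3) y =>
          if PySem.Set.contains p.2 y then p else (p.1 ++ [y], PySem.Set.add p.2 y))
        (q, seen)
      pvBfs adj fuel st.1 st.2

def pvConnectedComponents (g : PvGraph) : Int :=
  (g.1.foldl
    (fun (p : PySem.Set PvT3 × Int) v =>
      if PySem.Set.contains p.1 v then p
      else (pvBfs g.2 (g.1.length + 1) [v] (PySem.Set.add p.1 v), p.2 + 1))
    (([] : PySem.Set PvT3), 0)).2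

def pvEdgeSum (g : PvGraph) : Int :=
  ((g.2.values).map (fun v => PySem.Set.len v)).sum

def pvCycleRank (g : PvGraph) : Int :=
  let V : Int := PySem.Set.len g.1
  let E : Int := PySem.Int.floordiv (pvEdgeSum g) 2
  let C : Int := pvConnectedComponents g
  E - V + C

def bounded_pachner_enumeration (n : Int) : List (String × Int) :=
  let g := pvFn n
  [("n", n),
   ("V", PySem.Set.len g.1),
   ("E", PySem.Int.floordiv (pvEdgeSum g) 2),
   ("C", pvConnectedComponents g),
   ("cycle_rank", pvCycleRank g)]

-- ===== PORT B =====
def bounded_pachner_enumeration_alt (n : Int) : List (String × Int) :=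
  let V : Int := if 3 ≤ n then PySem.Int.floordiv (n * (n - 1) * (n - 2)) 6 else 0
  let E : Int := PySem.Int.floordiv (V * 3 * (n - 3)) 2
  let C : Int := if 3 ≤ n then 1 else 0
  [("n", n), ("V", V), ("E", E), ("C", C), ("cycle_rank", E - V + C)]

-- ===== PRECONDITION & SPEC =====
def Spec_bounded_pachner_enumeration (n : Int) (out : List (String × Int)) : Prop := out = bounded_pachner_enumeration_alt n
instance (n : Int) (out : List (String × Int)) : Decidable (Spec_bounded_pachner_enumeration n out) := by unfold Spec_bounded_pachner_enumeration; infer_instance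

-- ===== CLAIM (what is proved, stated in full; the proofs are below) =====
def Claim_equal_bounded_pachner_enumeration : Prop := ∀ (n : Int), Dom_bounded_pachner_enumeration n → Spec_bounded_pachner_enumeration n (bounded_pachner_enumeration n)

-- ===== LEMMAS AND PROOFS =====

-- proof-side helpers
def pvMem3 (v : Int) (t : PvT3) : Prop := v = t.1 ∨ v = t.2.1 ∨ v = t.2.2
def pvIncr (t : PvT3) : Prop := t.1 < t.2.1 ∧ t.2.1 < t.2.2
def pvStates (n : Int) : List PvT3 := pvCombos3 (PySem.List.pyRange 0 n 1)
def pvAdjGet (d : PySem.Dict PvT3 (PySem.Set PvT3)) (x : PvT3) : List PvT3 := d.getD x []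
def pvIns3 (p q e : Int) : PvT3 := if e < p then (e, p, q) else if e < q then (p, e, q) else (p, q, e)
def pvInd (v : Int) (t : PvT3) : Int := if v = t.1 ∨ v = t.2.1 ∨ v = t.2.2 then 1 else 0

theorem mem_pvPairs2 {l : List Int} (h : l.Pairwise (· < ·)) (p q : Int) :
    (p, q) ∈ pvPairs2 l ↔ p ∈ l ∧ q ∈ l ∧ p < q := by
  induction l with
  | nil => simp [pvPairs2]
  | cons x xs ih =>
    rw [List.pairwise_cons] at h
    simp only [pvPairs2, List.mem_append, List.mem_map, List.mem_cons, ih h.2]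
    constructor
    · rintro (⟨y, hy, he⟩ | ⟨hp, hq, hlt⟩)
      · obtain ⟨rfl, rfl⟩ := Prod.mk.injEq .. ▸ he
        exact ⟨Or.inl rfl, Or.inr hy, h.1 _ hy⟩
      · exact ⟨Or.inr hp, Or.inr hq, hlt⟩
    · rintro ⟨hp | hp, hq | hq, hlt⟩
      · omega
      · exact Or.inl ⟨q, hq, by rw [hp]⟩
      · exact absurd (h.1 _ hp) (by omega)
      · exact Or.inr ⟨hp, hq, hlt⟩

theorem mem_pvCombos3 {l : List Int} (h : l.Pairwise (· < ·)) (t : PvT3) :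
    t ∈ pvCombos3 l ↔ t.1 ∈ l ∧ t.2.1 ∈ l ∧ t.2.2 ∈ l ∧ pvIncr t := by
  obtain ⟨a, b, c⟩ := t
  simp only [pvIncr]
  induction l with
  | nil => simp [pvCombos3]
  | cons x xs ih =>
    rw [List.pairwise_cons] at h
    simp only [pvCombos3, List.mem_append, List.mem_map, List.mem_cons, ih h.2,
      Prod.mk.injEq]
    constructor
    · rintro (⟨⟨p, q⟩, hy, hx, hb, hc⟩ | ⟨ha, hb, hc, hi⟩)
      · subst hx; subst hb; subst hc
        rw [mem_pvPairs2 h.2] at hy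
        exact ⟨Or.inl rfl, Or.inr hy.1, Or.inr hy.2.1, h.1 _ hy.1, hy.2.2⟩
      · exact ⟨Or.inr ha, Or.inr hb, Or.inr hc, hi⟩
    · rintro ⟨ha, hb, hc, hi1, hi2⟩
      rcases ha with rfl | ha
      · rcases hb with rfl | hb
        · omega
        rcases hc with rfl | hc
        · exact absurd (h.1 _ hb) (by omega)
        · exact Or.inl ⟨(b, c), (mem_pvPairs2 h.2 b c).mpr ⟨hb, hc, hi2⟩, rfl, rfl, rfl⟩
      · rcases hb with rfl | hb
        · exact absurd (h.1 _ ha) (by omega)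
        rcases hc with rfl | hc
        · exact absurd (h.1 _ hb) (by omega)
        · exact Or.inr ⟨ha, hb, hc, hi1, hi2⟩

theorem nodup_pvPairs2 {l : List Int} (h : l.Pairwise (· < ·)) : (pvPairs2 l).Nodup := by
  induction l with
  | nil => simp [pvPairs2]
  | cons x xs ih =>
    rw [List.pairwise_cons] at h
    refine List.Nodup.append ?_ (ih h.2) ?_
    · exact (List.nodup_map_iff (by intro a b hab; simpa [Prod.ext_iff] using hab)).mpr
        h.2.nodup
    · intro p hp hp2
      obtain ⟨y, hy, rfl⟩ := List.mem_map.mp hp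
      rw [mem_pvPairs2 h.2] at hp2
      exact absurd (h.1 _ hp2.1) (by omega)

theorem nodup_pvCombos3 {l : List Int} (h : l.Pairwise (· < ·)) : (pvCombos3 l).Nodup := by
  induction l with
  | nil => simp [pvCombos3]
  | cons x xs ih =>
    rw [List.pairwise_cons] at h
    refine List.Nodup.append ?_ (ih h.2) ?_
    · exact (List.nodup_map_iff (by intro a b hab; simpa [Prod.ext_iff] using hab)).mpr
        (nodup_pvPairs2 h.2)
    · intro t ht ht2
      obtain ⟨y, hy, rfl⟩ := List.mem_map.mp ht
      rw [mem_pvCombos3 h.2] at ht2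
      exact absurd (h.1 _ ht2.1) (by omega)

theorem len_pvPairs2 : ∀ l : List Int, 2 * (pvPairs2 l).length = l.length * (l.length - 1)
  | [] => rfl
  | x :: xs => by
      simp only [pvPairs2, List.length_append, List.length_map, List.length_cons]
      have ih := len_pvPairs2 xs
      cases hk : xs.length with
      | zero => rw [hk] at ih; omega
      | succ j =>
        rw [hk] at ih
        simp only [Nat.succ_sub_one] at ih ⊢
        nlinarith [ih]

theorem len_pvCombos3 : ∀ l : List Int,
    6 * (pvCombos3 l).length = l.length * (l.length - 1) * (l.length - 2)
  | [] => rfl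
  | x :: xs => by
      simp only [pvCombos3, List.length_append, List.length_map, List.length_cons]
      have ih := len_pvCombos3 xs
      have h2 := len_pvPairs2 xs
      cases hk : xs.length with
      | zero => rw [hk] at ih h2; omega
      | succ j =>
        rw [hk] at ih h2
        cases j with
        | zero => rw [show (1:Nat) - 1 = 0 from rfl] at ih h2; omega
        | succ i =>
          simp only [Nat.succ_sub_one] at ih h2 ⊢
          rw [show i + 1 + 1 - 2 = i from by omega] at ih
          rw [show i + 1 + 1 + 1 - 2 = i + 1 from by omega]
          nlinarith [ih, h2]

theorem mem_pvStates {n : Int} (t : PvT3) :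
    t ∈ pvStates n ↔ 0 ≤ t.1 ∧ t.2.2 < n ∧ pvIncr t := by
  rw [pvStates, mem_pvCombos3 (PySem.List.pairwise_lt_pyRange_one 0 n)]
  simp only [PySem.List.mem_pyRange_one, pvIncr]
  omega

theorem nodup_pvStates (n : Int) : (pvStates n).Nodup :=
  nodup_pvCombos3 (PySem.List.pairwise_lt_pyRange_one 0 n)

theorem len_pvStates (n : Int) :
    6 * (pvStates n).length = n.toNat * (n.toNat - 1) * (n.toNat - 2) := by
  have h := len_pvCombos3 (PySem.List.pyRange 0 n 1)
  rw [PySem.List.length_pyRange_one, Int.sub_zero] at h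
  exact h

theorem pvInterLen_eq {a : PvT3} (b : PvT3) (ha : pvIncr a) :
    pvInterLen a b = pvInd a.1 b + pvInd a.2.1 b + pvInd a.2.2 b := by
  obtain ⟨a1, a2, a3⟩ := a
  obtain ⟨h1, h2⟩ := ha
  dsimp only at h1 h2 ⊢
  have hof : PySem.Set.ofList [a1, a2, a3] = [a1, a2, a3] :=
    PySem.Set.ofList_eq_self_of_nodup _ (by
      simp only [List.nodup_cons, List.mem_cons, List.not_mem_nil, List.nodup_nil,
        or_false, and_true, not_or, not_false_eq_true]
      omega)
  have hc : ∀ v : Int, (PySem.Set.ofList [b.1, b.2.1, b.2.2]).contains v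
      = decide (v = b.1 ∨ v = b.2.1 ∨ v = b.2.2) := by
    intro v
    by_cases h : v = b.1 ∨ v = b.2.1 ∨ v = b.2.2
    · simp only [h, decide_true]
      rw [PySem.Set.contains_iff, PySem.Set.mem_ofList]
      simpa using h
    · simp only [h, decide_false]
      rw [← Bool.not_eq_true, PySem.Set.contains_iff, PySem.Set.mem_ofList]
      simpa using h
  rw [pvInterLen, hof]
  simp only [PySem.Set.inter, PySem.Set.len, List.filter, hc, pvInd]
  by_cases m1 : a1 = b.1 ∨ a1 = b.2.1 ∨ a1 = b.2.2 <;>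
    by_cases m2 : a2 = b.1 ∨ a2 = b.2.1 ∨ a2 = b.2.2 <;>
      by_cases m3 : a3 = b.1 ∨ a3 = b.2.1 ∨ a3 = b.2.2 <;>
        simp [m1, m2, m3]

theorem pvMem3_iff (v : Int) (t : PvT3) : pvMem3 v t ↔ (v = t.1 ∨ v = t.2.1 ∨ v = t.2.2) :=
  Iff.rfl

theorem pvInd_of_mem3 {v : Int} {t : PvT3} (h : pvMem3 v t) : pvInd v t = 1 := by
  rw [pvInd, if_pos (pvMem3_iff v t |>.mp h)]

theorem pvInd_of_not_mem3 {v : Int} {t : PvT3} (h : ¬ pvMem3 v t) : pvInd v t = 0 := by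
  rw [pvInd, if_neg (fun hc => h ((pvMem3_iff v t).mpr hc))]

theorem pvInterLen_symm {a b : PvT3} (ha : pvIncr a) (hb : pvIncr b) :
    pvInterLen a b = pvInterLen b a := by
  rw [pvInterLen_eq b ha, pvInterLen_eq a hb]
  obtain ⟨a1, a2, a3⟩ := a; obtain ⟨b1, b2, b3⟩ := b
  obtain ⟨h1, h2⟩ := ha; obtain ⟨h3, h4⟩ := hb
  dsimp only at h1 h2 h3 h4 ⊢
  simp only [pvInd]
  split_ifs <;> omega

theorem pvIns3_mem3 {p q : Int} (e v : Int) (hpq : p < q) :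
    pvMem3 v (pvIns3 p q e) ↔ (v = p ∨ v = q ∨ v = e) := by
  rw [pvIns3, pvMem3]
  split_ifs <;> dsimp only <;> omega

theorem pvIns3_incr {p q e : Int} (hpq : p < q) (hep : e ≠ p) (heq : e ≠ q) :
    pvIncr (pvIns3 p q e) := by
  rw [pvIns3, pvIncr]
  split_ifs <;> dsimp only <;> omega

theorem pvExt3 {x y : PvT3} (hx : pvIncr x) (hy : pvIncr y)
    (h : ∀ v, pvMem3 v x ↔ pvMem3 v y) : x = y := by
  obtain ⟨x1, x2, x3⟩ := x; obtain ⟨y1, y2, y3⟩ := y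
  have m1 := (h x1).mp (Or.inl rfl)
  have m2 := (h x2).mp (Or.inr (Or.inl rfl))
  have m3 := (h x3).mp (Or.inr (Or.inr rfl))
  have m4 := (h y1).mpr (Or.inl rfl)
  have m5 := (h y2).mpr (Or.inr (Or.inl rfl))
  have m6 := (h y3).mpr (Or.inr (Or.inr rfl))
  simp only [pvMem3] at m1 m2 m3 m4 m5 m6
  obtain ⟨i1, i2⟩ := hx; obtain ⟨i3, i4⟩ := hy
  dsimp only at *
  simp only [Prod.mk.injEq]
  omega

-- all ordered pairs (i < j) of a list, as A's double loop visits them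
def pvAllPairs : List PvT3 → List (PvT3 × PvT3)
  | [] => []
  | x :: xs => (xs.map fun y => (x, y)) ++ pvAllPairs xs

def pvEdgeStep (g : PvGraph) (p : PvT3 × PvT3) : PvGraph :=
  if pvInterLen p.1 p.2 == 2 then pvAddEdge g p.1 p.2 else g

theorem pvNodeFold_fst : ∀ (l : List PvT3) (g : PvGraph),
    (l.foldl (fun g s => pvAddNode g s) g).1 = PySem.Set.update g.1 l
  | [], g => rfl
  | x :: xs, g => by
      rw [List.foldl_cons, pvNodeFold_fst xs, PySem.Set.update_cons]
      rfl

theorem pvSetdefault_getD (d : PySem.Dict PvT3 (PySem.Set PvT3)) (k x : PvT3) :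
    (d.setdefault k []).getD x [] = d.getD x [] := by
  by_cases h : x = k
  · subst h; exact PySem.Dict.getD_setdefault_self d x [] []
  · rw [PySem.Dict.getD_eq_get?_getD, PySem.Dict.get?_setdefault_of_ne d [] h,
      ← PySem.Dict.getD_eq_get?_getD]

theorem pvNodeFold_getD : ∀ (l : List PvT3) (g : PvGraph) (x : PvT3),
    (l.foldl (fun g s => pvAddNode g s) g).2.getD x [] = g.2.getD x []
  | [], g, x => rfl
  | s :: xs, g, x => by
      rw [List.foldl_cons, pvNodeFold_getD xs]
      exact pvSetdefault_getD g.2 s x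

theorem pvNodeFold_contains : ∀ (l : List PvT3) (g : PvGraph) (x : PvT3),
    ((l.foldl (fun g s => pvAddNode g s) g).2.contains x = true) ↔
      (g.2.contains x = true ∨ x ∈ l)
  | [], g, x => by simp
  | s :: xs, g, x => by
      rw [List.foldl_cons]
      rw [pvNodeFold_contains xs]
      show ((g.2.setdefault s []).contains x = true ∨ x ∈ xs) ↔ _
      rw [PySem.Dict.contains_setdefault]
      simp only [Bool.or_eq_true, beq_iff_eq, List.mem_cons]
      tauto

theorem pvNodeFold_keys : ∀ (l : List PvT3) (g : PvGraph), l.Nodup →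
    (∀ x ∈ l, g.2.contains x = false) →
    (l.foldl (fun g s => pvAddNode g s) g).2.keys = g.2.keys ++ l
  | [], g, _, _ => by simp
  | s :: xs, g, hnd, hf => by
      rw [List.foldl_cons]
      have hs : g.2.contains s = false := hf s (List.mem_cons_self ..)
      have hd : (pvAddNode g s).2 = g.2.insert s [] :=
        PySem.Dict.setdefault_of_not_contains g.2 [] hs
      rw [List.nodup_cons] at hnd
      have hrec := pvNodeFold_keys xs (pvAddNode g s) hnd.2 (by
        intro x hx
        rw [hd, PySem.Dict.contains_insert]
        have hne : x ≠ s := fun he => hnd.1 (he ▸ hx)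
        rw [Bool.or_eq_false_iff]
        exact ⟨beq_eq_false_iff_ne.mpr hne, hf x (List.mem_cons_of_mem _ hx)⟩)
      rw [hrec, hd, PySem.Dict.keys_insert_of_not_contains g.2 [] hs, List.append_assoc,
        List.singleton_append]

theorem pvNested_eq {α : Type} (f : α → PvT3 → PvT3 → α) :
    ∀ (l : List PvT3) (full : List PvT3) (k : Nat) (g : α), l = full.drop k →
    (PySem.List.enumerate l (k : Int)).foldl
        (fun g ia => (PySem.List.slice full (some (ia.1 + 1)) none).foldl
          (fun g b => f g ia.2 b) g) g
      = (pvAllPairs l).foldl (fun g p => f g p.1 p.2) g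
  | [], full, k, g, _ => by
      simp only [PySem.List.enumerate_nil, pvAllPairs, List.foldl_nil]
  | x :: xs, full, k, g, h => by
      rw [PySem.List.enumerate_cons, List.foldl_cons]
      have h1 : ((k : Int) + 1) = ((k + 1 : Nat) : Int) := by push_cast; ring
      have h3 : xs = full.drop (k + 1) := by
        rw [← List.tail_drop, ← h, List.tail_cons]
      have h2 : PySem.List.slice full (some ((k : Int) + 1)) none = xs := by
        rw [h1, PySem.List.slice_from_natCast, ← h3]
      rw [h2, h1, pvNested_eq f xs full (k + 1) _ h3]
      rw [pvAllPairs, List.foldl_append, List.foldl_map]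

theorem mem_pvAllPairs_of {l : List PvT3} (hnd : l.Nodup) {p : PvT3 × PvT3}
    (hp : p ∈ pvAllPairs l) : p.1 ∈ l ∧ p.2 ∈ l ∧ p.1 ≠ p.2 := by
  induction l with
  | nil => simp [pvAllPairs] at hp
  | cons x xs ih =>
    rw [List.nodup_cons] at hnd
    rw [pvAllPairs, List.mem_append] at hp
    rcases hp with hp | hp
    · obtain ⟨y, hy, rfl⟩ := List.mem_map.mp hp
      refine ⟨List.mem_cons_self .., List.mem_cons_of_mem _ hy, fun he => hnd.1 ?_⟩
      dsimp only at he
      rw [he]; exact hy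
    · have h := ih hnd.2 hp
      exact ⟨List.mem_cons_of_mem _ h.1, List.mem_cons_of_mem _ h.2.1, h.2.2⟩

theorem pvAllPairs_cover {l : List PvT3} (hnd : l.Nodup) {x y : PvT3}
    (hx : x ∈ l) (hy : y ∈ l) (hne : x ≠ y) :
    (x, y) ∈ pvAllPairs l ∨ (y, x) ∈ pvAllPairs l := by
  induction l with
  | nil => simp at hx
  | cons z zs ih =>
    rw [List.nodup_cons] at hnd
    rcases List.mem_cons.mp hx with rfl | hx' <;> rcases List.mem_cons.mp hy with rfl | hy'
    · exact absurd rfl hne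
    · exact Or.inl (by rw [pvAllPairs, List.mem_append]; exact Or.inl (List.mem_map.mpr ⟨y, hy', rfl⟩))
    · exact Or.inr (by rw [pvAllPairs, List.mem_append]; exact Or.inl (List.mem_map.mpr ⟨x, hx', rfl⟩))
    · rcases ih hnd.2 hx' hy' with h | h
      · exact Or.inl (by rw [pvAllPairs, List.mem_append]; exact Or.inr h)
      · exact Or.inr (by rw [pvAllPairs, List.mem_append]; exact Or.inr h)

theorem pvAddEdge_eq {g : PvGraph} {a b : PvT3} (ha : g.2.contains a = true)
    (hb : g.2.contains b = true) (hna : a ∈ g.1) (hnb : b ∈ g.1) :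
    pvAddEdge g a b = (g.1, (g.2.modify a [] (fun s => PySem.Set.add s b)).modify b []
      (fun s => PySem.Set.add s a)) := by
  unfold pvAddEdge
  rw [PySem.Set.add_of_mem hna, PySem.Set.add_of_mem hnb,
    PySem.Dict.setdefault_of_contains g.2 [] ha, PySem.Dict.setdefault_of_contains g.2 [] hb]

set_option maxHeartbeats 1000000 in
theorem pvEdgeFold_char :
    ∀ (P : List (PvT3 × PvT3)) (g : PvGraph) (S : List PvT3) (Q : PvT3 → PvT3 → Prop),
    (∀ p ∈ P, p.1 ∈ S ∧ p.2 ∈ S) →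
    (∀ x ∈ S, x ∈ g.1) →
    (∀ x, g.2.contains x = true ↔ x ∈ S) →
    (∀ x, (pvAdjGet g.2 x).Nodup) →
    (∀ x y, y ∈ pvAdjGet g.2 x ↔ Q x y) →
    ((P.foldl pvEdgeStep g).1 = g.1 ∧
     (P.foldl pvEdgeStep g).2.keys = g.2.keys ∧
     (∀ x, (P.foldl pvEdgeStep g).2.contains x = true ↔ x ∈ S) ∧
     (∀ x, (pvAdjGet (P.foldl pvEdgeStep g).2 x).Nodup) ∧
     (∀ x y, y ∈ pvAdjGet (P.foldl pvEdgeStep g).2 x ↔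
        (Q x y ∨ ∃ p ∈ P, pvInterLen p.1 p.2 = 2 ∧ ((x = p.1 ∧ y = p.2) ∨ (x = p.2 ∧ y = p.1)))))
  | [], g, S, Q, _, _, hc, hn, hq => by
      refine ⟨rfl, rfl, hc, hn, fun x y => ?_⟩
      rw [List.foldl_nil, hq]
      simp
  | p :: P, g, S, Q, hP, hnodes, hc, hn, hq => by
      rw [List.foldl_cons]
      have hmem := hP p (List.mem_cons_self ..)
      by_cases hcond : pvInterLen p.1 p.2 = 2
      · have hstep : pvEdgeStep g p = (g.1, (g.2.modify p.1 [] (fun s => PySem.Set.add s p.2)).modify p.2 []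
            (fun s => PySem.Set.add s p.1)) := by
          rw [pvEdgeStep, if_pos (by exact beq_iff_eq.mpr hcond)]
          exact pvAddEdge_eq ((hc _).mpr hmem.1) ((hc _).mpr hmem.2)
            (hnodes _ hmem.1) (hnodes _ hmem.2)
        set d3 := (g.2.modify p.1 [] (fun s => PySem.Set.add s p.2)).modify p.2 []
            (fun s => PySem.Set.add s p.1) with hd3
        have hget : ∀ x, pvAdjGet d3 x =
            (if x = p.2 then PySem.Set.add (if p.2 = p.1 then PySem.Set.add (pvAdjGet g.2 p.1) p.2 else pvAdjGet g.2 p.2) p.1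
             else if x = p.1 then PySem.Set.add (pvAdjGet g.2 p.1) p.2 else pvAdjGet g.2 x) := by
          intro x
          rw [hd3, pvAdjGet, PySem.Dict.getD_modify, PySem.Dict.getD_modify]
          by_cases h2 : x = p.2 <;> by_cases h1 : x = p.1 <;>
            simp only [h1, h2, if_true, if_false, pvAdjGet, PySem.Dict.getD_modify]
        have hmemd3 : ∀ x y, y ∈ pvAdjGet d3 x ↔
            (y ∈ pvAdjGet g.2 x ∨ (x = p.1 ∧ y = p.2) ∨ (x = p.2 ∧ y = p.1)) := by
          intro x y
          rw [hget]
          by_cases h2 : x = p.2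
          · rw [if_pos h2]
            by_cases h21 : p.2 = p.1
            · rw [if_pos h21, PySem.Set.mem_add, PySem.Set.mem_add]
              subst h2; rw [h21]
              tauto
            · rw [if_neg h21, PySem.Set.mem_add]
              subst h2
              constructor
              · rintro (h | h)
                · exact Or.inl h
                · exact Or.inr (Or.inr ⟨rfl, h⟩)
              · rintro (h | ⟨hx, hy⟩ | ⟨hx, hy⟩)
                · exact Or.inl h
                · exact absurd hx h21
                · exact Or.inr hy
          · rw [if_neg h2]
            by_cases h1 : x = p.1
            · rw [if_pos h1, PySem.Set.mem_add]
              subst h1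
              constructor
              · rintro (h | h)
                · exact Or.inl h
                · exact Or.inr (Or.inl ⟨rfl, h⟩)
              · rintro (h | ⟨hx, hy⟩ | ⟨hx, hy⟩)
                · exact Or.inl h
                · exact Or.inr hy
                · exact absurd hx h2
            · rw [if_neg h1]
              constructor
              · exact Or.inl
              · rintro (h | ⟨hx, hy⟩ | ⟨hx, hy⟩)
                · exact h
                · exact absurd hx h1
                · exact absurd hx h2
        have hq' : ∀ x y, y ∈ pvAdjGet d3 x ↔
            (Q x y ∨ (pvInterLen p.1 p.2 = 2 ∧ ((x = p.1 ∧ y = p.2) ∨ (x = p.2 ∧ y = p.1)))) := by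
          intro x y
          rw [hmemd3, hq]
          constructor
          · rintro (h | h)
            · exact Or.inl h
            · exact Or.inr ⟨hcond, h⟩
          · rintro (h | ⟨_, h⟩)
            · exact Or.inl h
            · exact Or.inr h
        have hnd' : ∀ x, (pvAdjGet d3 x).Nodup := by
          intro x
          rw [hget]
          split_ifs <;> first
            | exact PySem.Set.nodup_add _ _ (PySem.Set.nodup_add _ _ (hn _))
            | exact PySem.Set.nodup_add _ _ (hn _)
            | exact hn _
        have hcont' : ∀ x, d3.contains x = true ↔ x ∈ S := by
          intro x
          rw [hd3, PySem.Dict.contains_modify, PySem.Dict.contains_modify]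
          simp only [Bool.or_eq_true, beq_iff_eq]
          constructor
          · rintro (rfl | rfl | h)
            · exact hmem.2
            · exact hmem.1
            · exact (hc x).mp h
          · intro h
            exact Or.inr (Or.inr ((hc x).mpr h))
        have hkeys' : d3.keys = g.2.keys := by
          have hc2 : (g.2.modify p.1 [] (fun s => PySem.Set.add s p.2)).contains p.2 = true := by
            rw [PySem.Dict.contains_modify]
            simp only [Bool.or_eq_true, beq_iff_eq]
            exact Or.inr ((hc _).mpr hmem.2)
          rw [hd3, PySem.Dict.keys_modify, PySem.Dict.keys_insert_of_contains _ _ hc2,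
            PySem.Dict.keys_modify, PySem.Dict.keys_insert_of_contains _ _ ((hc _).mpr hmem.1)]
        have hnodes' : ∀ x ∈ S, x ∈ (pvEdgeStep g p).1 := by
          rw [hstep]; exact hnodes
        have ih := pvEdgeFold_char P (pvEdgeStep g p) S
          (fun x y => Q x y ∨ (pvInterLen p.1 p.2 = 2 ∧ ((x = p.1 ∧ y = p.2) ∨ (x = p.2 ∧ y = p.1))))
          (fun q hq => hP q (List.mem_cons_of_mem _ hq)) hnodes'
          (by rw [hstep]; exact hcont') (by rw [hstep]; exact hnd') (by rw [hstep]; exact hq')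
        refine ⟨by rw [ih.1, hstep], by rw [ih.2.1, hstep, hkeys'], ih.2.2.1, ih.2.2.2.1, fun x y => ?_⟩
        rw [ih.2.2.2.2]
        rw [List.exists_mem_cons_iff]
        exact or_assoc
      · have hstep : pvEdgeStep g p = g := by
          rw [pvEdgeStep, if_neg (by simpa using hcond)]
        rw [hstep]
        have ih := pvEdgeFold_char P g S Q (fun q hq => hP q (List.mem_cons_of_mem _ hq))
          hnodes hc hn hq
        refine ⟨ih.1, ih.2.1, ih.2.2.1, ih.2.2.2.1, fun x y => ?_⟩
        rw [ih.2.2.2.2, List.exists_mem_cons_iff]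
        constructor
        · intro h
          rcases h with h | h
          · exact Or.inl h
          · exact Or.inr (Or.inr h)
        · rintro (h | h | h)
          · exact Or.inl h
          · exact absurd h.1 hcond
          · exact Or.inr h

theorem pvIncr_of_mem {n : Int} {x : PvT3} (h : x ∈ pvStates n) : pvIncr x :=
  ((mem_pvStates x).mp h).2.2

set_option maxHeartbeats 1000000 in
theorem pvFn_char (n : Int) :
    (pvFn n).1 = pvStates n ∧ (pvFn n).2.keys = pvStates n ∧
    (∀ x, (pvAdjGet (pvFn n).2 x).Nodup) ∧
    (∀ x y, y ∈ pvAdjGet (pvFn n).2 x ↔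
      (x ∈ pvStates n ∧ y ∈ pvStates n ∧ x ≠ y ∧ pvInterLen x y = 2)) := by
  have hnd := nodup_pvStates n
  have hfn : pvFn n = (pvAllPairs (pvStates n)).foldl pvEdgeStep
      ((pvStates n).foldl (fun g s => pvAddNode g s)
        (([] : PySem.Set PvT3), PySem.Dict.empty)) := by
    exact pvNested_eq (fun g a b => if pvInterLen a b == 2 then pvAddEdge g a b else g)
      (pvStates n) (pvStates n) 0 _ rfl
  set g0 : PvGraph := (pvStates n).foldl (fun g s => pvAddNode g s)
      (([] : PySem.Set PvT3), PySem.Dict.empty) with hg0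
  have hfst : g0.1 = pvStates n := by
    rw [hg0, pvNodeFold_fst, PySem.Set.update_nil_left, PySem.Set.ofList_eq_self_of_nodup _ hnd]
  have hgetD : ∀ x, pvAdjGet g0.2 x = [] := by
    intro x
    rw [hg0, pvAdjGet, pvNodeFold_getD]
    rfl
  have hcont : ∀ x, g0.2.contains x = true ↔ x ∈ pvStates n := by
    intro x
    rw [hg0, pvNodeFold_contains]
    simp [PySem.Dict.contains_empty]
  have hkeys : g0.2.keys = pvStates n := by
    rw [hg0, pvNodeFold_keys _ _ hnd (fun x _ => PySem.Dict.contains_empty x)]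
    rfl
  have hmain := pvEdgeFold_char (pvAllPairs (pvStates n)) g0 (pvStates n) (fun _ _ => False)
    (fun p hp => ⟨(mem_pvAllPairs_of hnd hp).1, (mem_pvAllPairs_of hnd hp).2.1⟩)
    (fun x hx => hfst ▸ hx) hcont
    (fun x => by rw [hgetD]; exact List.nodup_nil)
    (fun x y => by rw [hgetD]; simp)
  rw [← hfn] at hmain
  refine ⟨hmain.1.trans hfst, hmain.2.1.trans hkeys, hmain.2.2.2.1, fun x y => ?_⟩
  rw [hmain.2.2.2.2]
  simp only [false_or]
  constructor
  · rintro ⟨p, hp, hC, hor⟩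
    obtain ⟨h1, h2, hne⟩ := mem_pvAllPairs_of hnd hp
    rcases hor with ⟨rfl, rfl⟩ | ⟨rfl, rfl⟩
    · exact ⟨h1, h2, hne, hC⟩
    · exact ⟨h2, h1, hne.symm,
        (pvInterLen_symm (pvIncr_of_mem h2) (pvIncr_of_mem h1)).trans hC⟩
  · rintro ⟨hx, hy, hne, hC⟩
    rcases pvAllPairs_cover hnd hx hy hne with h | h
    · exact ⟨(x, y), h, hC, Or.inl ⟨rfl, rfl⟩⟩
    · exact ⟨(y, x), h, (pvInterLen_symm (pvIncr_of_mem hy) (pvIncr_of_mem hx)).trans hC,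
        Or.inr ⟨rfl, rfl⟩⟩

def pvOthers (n a b c : Int) : List Int :=
  (PySem.List.pyRange 0 n 1).filter (fun e => decide (¬(e = a ∨ e = b ∨ e = c)))

def pvNbr (n : Int) (x : PvT3) : List PvT3 :=
  (pvOthers n x.1 x.2.1 x.2.2).map (fun e => pvIns3 x.1 x.2.1 e) ++
  ((pvOthers n x.1 x.2.1 x.2.2).map (fun e => pvIns3 x.1 x.2.2 e) ++
   (pvOthers n x.1 x.2.1 x.2.2).map (fun e => pvIns3 x.2.1 x.2.2 e))

theorem mem_pvOthers {n a b c e : Int} :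
    e ∈ pvOthers n a b c ↔ (0 ≤ e ∧ e < n ∧ e ≠ a ∧ e ≠ b ∧ e ≠ c) := by
  rw [pvOthers, List.mem_filter, PySem.List.mem_pyRange_one, decide_eq_true_iff]
  omega

theorem nodup_pvOthers (n a b c : Int) : (pvOthers n a b c).Nodup :=
  (PySem.List.nodup_pyRange_one 0 n).filter _

theorem len_pvOthers {n a b c : Int} (h : 0 ≤ a ∧ a < b ∧ b < c ∧ c < n) :
    (pvOthers n a b c).length = n.toNat - 3 := by
  have hsplit := List.length_eq_countP_add_countP
    (fun e => decide (¬(e = a ∨ e = b ∨ e = c))) (l := PySem.List.pyRange 0 n 1)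
  have hco : ((PySem.List.pyRange 0 n 1).countP
      (fun e => decide ¬(decide (¬(e = a ∨ e = b ∨ e = c)) = true))) = 3 := by
    rw [List.countP_eq_length_filter]
    have hperm : ((PySem.List.pyRange 0 n 1).filter
        (fun e => decide ¬(decide (¬(e = a ∨ e = b ∨ e = c)) = true))).Perm [a, b, c] := by
      rw [List.perm_ext_iff_of_nodup ((PySem.List.nodup_pyRange_one 0 n).filter _)
        (by simp only [List.nodup_cons, List.mem_cons, List.not_mem_nil, List.nodup_nil,
          or_false, and_true, not_or, not_false_eq_true]; omega)]
      intro t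
      rw [List.mem_filter, PySem.List.mem_pyRange_one]
      simp only [decide_eq_true_iff, not_not, List.mem_cons, List.not_mem_nil, or_false]
      omega
    rw [hperm.length_eq]
    rfl
  rw [List.countP_eq_length_filter] at hsplit
  rw [PySem.List.length_pyRange_one] at hsplit
  rw [pvOthers]
  omega

theorem pvIns3_state {n p q e : Int} (hpq : p < q) (h0p : 0 ≤ p) (h0e : 0 ≤ e)
    (hqn : q < n) (hen : e < n) (hep : e ≠ p) (heq : e ≠ q) : pvIns3 p q e ∈ pvStates n := by
  rw [mem_pvStates, pvIns3, pvIncr]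
  split_ifs <;> dsimp only <;> omega

theorem pvIns3_inj {u v e1 e2 : Int} (huv : u < v) (h1u : e1 ≠ u) (h1v : e1 ≠ v)
    (h2u : e2 ≠ u) (h2v : e2 ≠ v) (h : pvIns3 u v e1 = pvIns3 u v e2) : e1 = e2 := by
  have h1 : pvMem3 e1 (pvIns3 u v e1) := (pvIns3_mem3 e1 e1 huv).mpr (Or.inr (Or.inr rfl))
  rw [h, pvIns3_mem3 e2 e1 huv] at h1
  omega

theorem pvFind_e {n : Int} {y : PvT3} {u v w : Int} (hy : y ∈ pvStates n) (huv : u < v)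
    (hu : pvMem3 u y) (hv : pvMem3 v y) (hw : ¬ pvMem3 w y) :
    ∃ e, pvMem3 e y ∧ e ≠ u ∧ e ≠ v ∧ e ≠ w ∧ 0 ≤ e ∧ e < n ∧ y = pvIns3 u v e := by
  obtain ⟨y1, y2, y3⟩ := y
  rw [mem_pvStates] at hy
  obtain ⟨h0, hn, hi⟩ := hy
  obtain ⟨i1, i2⟩ := hi
  have h0' : 0 ≤ y1 := h0
  have hn' : y3 < n := hn
  have i1' : y1 < y2 := i1
  have i2' : y2 < y3 := i2
  clear h0 hn i1 i2
  simp only [pvMem3] at hu hv hw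
  rcases hu with rfl | rfl | rfl <;> rcases hv with rfl | rfl | rfl
  · omega
  · -- u = y1, v = y2, e = y3
    refine ⟨y3, Or.inr (Or.inr rfl), by omega, by omega, by omega, by omega, by omega, ?_⟩
    refine pvExt3 ⟨i1', i2'⟩ (pvIns3_incr huv (by omega) (by omega)) ?_
    intro t
    rw [pvIns3_mem3 y3 t huv]
    exact Iff.rfl
  · -- u = y1, v = y3, e = y2
    refine ⟨y2, Or.inr (Or.inl rfl), by omega, by omega, by omega, by omega, by omega, ?_⟩
    refine pvExt3 ⟨i1', i2'⟩ (pvIns3_incr huv (by omega) (by omega)) ?_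
    intro t
    rw [pvIns3_mem3 y2 t huv]
    simp only [pvMem3]
    omega
  · omega
  · omega
  · -- u = y2, v = y3, e = y1
    refine ⟨y1, Or.inl rfl, by omega, by omega, by omega, by omega, by omega, ?_⟩
    refine pvExt3 ⟨i1', i2'⟩ (pvIns3_incr huv (by omega) (by omega)) ?_
    intro t
    rw [pvIns3_mem3 y1 t huv]
    simp only [pvMem3]
    omega
  · omega
  · omega
  · omega

set_option maxHeartbeats 1000000 in
theorem mem_pvNbr {n : Int} {x : PvT3} (hx : x ∈ pvStates n) (y : PvT3) :
    y ∈ pvNbr n x ↔ (y ∈ pvStates n ∧ y ≠ x ∧ pvInterLen x y = 2) := by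
  obtain ⟨hx0, hxn, hxi⟩ := (mem_pvStates x).mp hx
  obtain ⟨a, b, c⟩ := x
  obtain ⟨i1, i2⟩ := hxi
  dsimp only at hx0 hxn i1 i2
  have hxincr : pvIncr (a, b, c) := ⟨i1, i2⟩
  rw [pvNbr]
  simp only [List.mem_append, List.mem_map]
  constructor
  · rintro (⟨e, he, rfl⟩ | ⟨e, he, rfl⟩ | ⟨e, he, rfl⟩) <;>
      rw [mem_pvOthers] at he <;> obtain ⟨he0, hen, hea, heb, hec⟩ := he
    · -- y = pvIns3 a b e
      have hmm3 : ∀ v, pvMem3 v (pvIns3 a b e) ↔ (v = a ∨ v = b ∨ v = e) :=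
        fun v => pvIns3_mem3 e v i1
      refine ⟨pvIns3_state i1 (by omega) he0 (by omega) hen hea heb, ?_, ?_⟩
      · intro hcon
        have h1 := (hmm3 e).mpr (Or.inr (Or.inr rfl))
        rw [hcon] at h1
        exact absurd (show e = a ∨ e = b ∨ e = c from h1) (by omega)
      · rw [pvInterLen_eq _ hxincr]
        rw [pvInd_of_mem3 ((hmm3 a).mpr (Or.inl rfl)),
          pvInd_of_mem3 ((hmm3 b).mpr (Or.inr (Or.inl rfl))),
          pvInd_of_not_mem3 (fun hc : pvMem3 c (pvIns3 a b e) => by rw [hmm3 c] at hc; omega)]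
        norm_num
    · -- y = pvIns3 a c e
      have hmm3 : ∀ v, pvMem3 v (pvIns3 a c e) ↔ (v = a ∨ v = c ∨ v = e) :=
        fun v => pvIns3_mem3 e v (by omega)
      refine ⟨pvIns3_state (by omega) (by omega) he0 (by omega) hen hea hec, ?_, ?_⟩
      · intro hcon
        have h1 := (hmm3 e).mpr (Or.inr (Or.inr rfl))
        rw [hcon] at h1
        exact absurd (show e = a ∨ e = b ∨ e = c from h1) (by omega)
      · rw [pvInterLen_eq _ hxincr]
        rw [pvInd_of_mem3 ((hmm3 a).mpr (Or.inl rfl)),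
          pvInd_of_mem3 ((hmm3 c).mpr (Or.inr (Or.inl rfl))),
          pvInd_of_not_mem3 (fun hc : pvMem3 b (pvIns3 a c e) => by rw [hmm3 b] at hc; omega)]
        norm_num
    · -- y = pvIns3 b c e
      have hmm3 : ∀ v, pvMem3 v (pvIns3 b c e) ↔ (v = b ∨ v = c ∨ v = e) :=
        fun v => pvIns3_mem3 e v i2
      refine ⟨pvIns3_state i2 (by omega) he0 (by omega) hen heb hec, ?_, ?_⟩
      · intro hcon
        have h1 := (hmm3 e).mpr (Or.inr (Or.inr rfl))
        rw [hcon] at h1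
        exact absurd (show e = a ∨ e = b ∨ e = c from h1) (by omega)
      · rw [pvInterLen_eq _ hxincr]
        rw [pvInd_of_not_mem3 (fun hc : pvMem3 a (pvIns3 b c e) => by rw [hmm3 a] at hc; omega),
          pvInd_of_mem3 ((hmm3 b).mpr (Or.inl rfl)),
          pvInd_of_mem3 ((hmm3 c).mpr (Or.inr (Or.inl rfl)))]
        norm_num
  · rintro ⟨hyS, hyne, hC⟩
    rw [pvInterLen_eq _ hxincr] at hC
    have hind : ∀ v, (pvInd v y = 1 ∧ pvMem3 v y) ∨ (pvInd v y = 0 ∧ ¬ pvMem3 v y) := by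
      intro v
      by_cases h : pvMem3 v y
      · exact Or.inl ⟨pvInd_of_mem3 h, h⟩
      · exact Or.inr ⟨pvInd_of_not_mem3 h, h⟩
    rcases hind a with ⟨hA1, hA⟩ | ⟨hA1, hA⟩ <;>
      rcases hind b with ⟨hB1, hB⟩ | ⟨hB1, hB⟩ <;>
        rcases hind c with ⟨hC1, hCC⟩ | ⟨hC1, hCC⟩ <;>
          rw [show ((a, b, c) : PvT3).1 = a from rfl, show ((a, b, c) : PvT3).2.1 = b from rfl,
            show ((a, b, c) : PvT3).2.2 = c from rfl, hA1, hB1, hC1] at hC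
    · exact absurd hC (by norm_num)
    · -- a, b ∈ y, c ∉ y
      obtain ⟨e, hey, heu, hev, hew, he0, hen, rfl⟩ := pvFind_e hyS i1 hA hB hCC
      exact Or.inl ⟨e, mem_pvOthers.mpr ⟨he0, hen, heu, hev, hew⟩, rfl⟩
    · -- a, c ∈ y, b ∉ y
      obtain ⟨e, hey, heu, hev, hew, he0, hen, rfl⟩ :=
        pvFind_e hyS (show a < c by omega) hA hCC hB
      exact Or.inr (Or.inl ⟨e, mem_pvOthers.mpr ⟨he0, hen, heu, hew, hev⟩, rfl⟩)
    · exact absurd hC (by norm_num)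
    · -- b, c ∈ y, a ∉ y
      obtain ⟨e, hey, heu, hev, hew, he0, hen, rfl⟩ := pvFind_e hyS i2 hB hCC hA
      exact Or.inr (Or.inr ⟨e, mem_pvOthers.mpr ⟨he0, hen, hew, heu, hev⟩, rfl⟩)
    · exact absurd hC (by norm_num)
    · exact absurd hC (by norm_num)
    · exact absurd hC (by norm_num)


theorem nodup_pvNbr {n : Int} {x : PvT3} (hx : x ∈ pvStates n) : (pvNbr n x).Nodup := by
  obtain ⟨h0, hn, hi⟩ := (mem_pvStates x).mp hx
  obtain ⟨a, b, c⟩ := x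
  have h0' : 0 ≤ a := h0
  have hn' : c < n := hn
  have i1 : a < b := hi.1
  have i2 : b < c := hi.2
  rw [pvNbr]
  have hB : ∀ u v : Int, u < v → (u = a ∨ u = b ∨ u = c) → (v = a ∨ v = b ∨ v = c) →
      ((pvOthers n ((a, b, c) : PvT3).1 ((a, b, c) : PvT3).2.1 ((a, b, c) : PvT3).2.2).map
        (fun e => pvIns3 u v e)).Nodup := by
    intro u v huv hu hv
    refine List.Nodup.map_on ?_ (nodup_pvOthers n a b c)
    intro e1 h1 e2 h2 heq
    rw [mem_pvOthers] at h1 h2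
    have h1' : 0 ≤ e1 ∧ e1 < n ∧ e1 ≠ a ∧ e1 ≠ b ∧ e1 ≠ c := h1
    have h2' : 0 ≤ e2 ∧ e2 < n ∧ e2 ≠ a ∧ e2 ≠ b ∧ e2 ≠ c := h2
    exact pvIns3_inj huv (by omega) (by omega) (by omega) (by omega) heq
  rw [List.nodup_append, List.nodup_append]
  refine ⟨hB a b i1 (Or.inl rfl) (Or.inr (Or.inl rfl)),
    ⟨hB a c (by omega) (Or.inl rfl) (Or.inr (Or.inr rfl)),
     hB b c i2 (Or.inr (Or.inl rfl)) (Or.inr (Or.inr rfl)), ?_⟩, ?_⟩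
  · -- B2, B3 elementwise distinct : via membership of a
    intro y hy2 z hz
    obtain ⟨e2, he2, rfl⟩ := List.mem_map.mp hy2
    obtain ⟨e3, he3, rfl⟩ := List.mem_map.mp hz
    rw [mem_pvOthers] at he2 he3
    have he2' : 0 ≤ e2 ∧ e2 < n ∧ e2 ≠ a ∧ e2 ≠ b ∧ e2 ≠ c := he2
    have he3' : 0 ≤ e3 ∧ e3 < n ∧ e3 ≠ a ∧ e3 ≠ b ∧ e3 ≠ c := he3
    intro hE
    have hma : pvMem3 a (pvIns3 a c e2) := (pvIns3_mem3 e2 a (by omega)).mpr (Or.inl rfl)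
    rw [hE] at hma
    have := (pvIns3_mem3 e3 a i2).mp hma
    omega
  · -- B1 and B2 ++ B3 elementwise distinct : via membership of c
    intro y hy1 z hz
    obtain ⟨e1, he1, rfl⟩ := List.mem_map.mp hy1
    rw [mem_pvOthers] at he1
    have he1' : 0 ≤ e1 ∧ e1 < n ∧ e1 ≠ a ∧ e1 ≠ b ∧ e1 ≠ c := he1
    have hnc : ¬ pvMem3 c (pvIns3 a b e1) := by
      rw [pvIns3_mem3 e1 c i1]
      omega
    intro hE
    rcases List.mem_append.mp hz with hy | hy
    · obtain ⟨e2, he2, heq⟩ := List.mem_map.mp hy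
      rw [mem_pvOthers] at he2
      have he2' : 0 ≤ e2 ∧ e2 < n ∧ e2 ≠ a ∧ e2 ≠ b ∧ e2 ≠ c := he2
      have hm2 : pvMem3 c (pvIns3 a c e2) :=
        (pvIns3_mem3 e2 c (show a < c by omega)).mpr (Or.inr (Or.inl rfl))
      rw [heq.trans hE.symm] at hm2
      exact hnc hm2
    · obtain ⟨e3, he3, heq⟩ := List.mem_map.mp hy
      rw [mem_pvOthers] at he3
      have he3' : 0 ≤ e3 ∧ e3 < n ∧ e3 ≠ a ∧ e3 ≠ b ∧ e3 ≠ c := he3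
      have hm3 : pvMem3 c (pvIns3 b c e3) :=
        (pvIns3_mem3 e3 c i2).mpr (Or.inr (Or.inl rfl))
      rw [heq.trans hE.symm] at hm3
      exact hnc hm3

theorem pvDegree {n : Int} {x : PvT3} (hx : x ∈ pvStates n) :
    ((pvAdjGet (pvFn n).2 x).length : Int) = 3 * (n - 3) := by
  have hperm : (pvAdjGet (pvFn n).2 x).Perm (pvNbr n x) := by
    rw [List.perm_ext_iff_of_nodup ((pvFn_char n).2.2.1 x) (nodup_pvNbr hx)]
    intro y
    rw [(pvFn_char n).2.2.2 x y, mem_pvNbr hx y]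
    constructor
    · rintro ⟨_, hy, hne, hC⟩
      exact ⟨hy, fun h => hne h.symm, hC⟩
    · rintro ⟨hy, hne, hC⟩
      exact ⟨hx, hy, fun h => hne h.symm, hC⟩
  rw [hperm.length_eq]
  obtain ⟨h0, hn, hi⟩ := (mem_pvStates x).mp hx
  have hlen := len_pvOthers (a := x.1) (b := x.2.1) (c := x.2.2) (n := n)
    ⟨h0, hi.1, hi.2, hn⟩
  rw [pvNbr]
  simp only [List.length_append, List.length_map, hlen]
  obtain ⟨x1, x2, x3⟩ := x
  have hb' : 0 ≤ x1 ∧ x1 < x2 ∧ x2 < x3 ∧ x3 < n := ⟨h0, hi.1, hi.2, hn⟩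
  omega

def pvReach (adj : PySem.Dict PvT3 (PySem.Set PvT3)) : PvT3 → PvT3 → Prop :=
  Relation.ReflTransGen (fun x y => y ∈ pvAdjGet adj x)

theorem pvBfs_inner (L : List PvT3) : ∀ (q : List PvT3) (seen : PySem.Set PvT3),
    ∃ d : List PvT3,
      (L.foldl (fun (p : List PvT3 × PySem.Set PvT3) y =>
        if PySem.Set.contains p.2 y then p else (p.1 ++ [y], PySem.Set.add p.2 y)) (q, seen)).1
        = q ++ d ∧
      (L.foldl (fun (p : List PvT3 × PySem.Set PvT3) y =>
        if PySem.Set.contains p.2 y then p else (p.1 ++ [y], PySem.Set.add p.2 y)) (q, seen)).2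
        = seen ++ d ∧
      d.Nodup ∧ (∀ y ∈ d, y ∈ L ∧ y ∉ seen) ∧
      (∀ y ∈ L, y ∈ (L.foldl (fun (p : List PvT3 × PySem.Set PvT3) y =>
        if PySem.Set.contains p.2 y then p else (p.1 ++ [y], PySem.Set.add p.2 y)) (q, seen)).2) := by
  induction L with
  | nil => exact fun q seen => ⟨[], by simp⟩
  | cons z L ih =>
    intro q seen
    rw [List.foldl_cons]
    by_cases hz : z ∈ seen
    · rw [if_pos (by rw [PySem.Set.contains_iff]; exact hz)]
      obtain ⟨d, h1, h2, h3, h4, h5⟩ := ih q seen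
      refine ⟨d, h1, h2, h3, fun y hy => ⟨List.mem_cons_of_mem _ (h4 y hy).1, (h4 y hy).2⟩,
        fun y hy => ?_⟩
      rcases List.mem_cons.mp hy with rfl | hy'
      · rw [h2]; exact List.mem_append_left _ hz
      · exact h5 y hy'
    · rw [if_neg (by rw [PySem.Set.contains_iff]; exact hz), PySem.Set.add_of_not_mem hz]
      obtain ⟨d, h1, h2, h3, h4, h5⟩ := ih (q ++ [z]) (seen ++ [z])
      refine ⟨z :: d, by rw [h1, List.append_assoc]; rfl, by rw [h2, List.append_assoc]; rfl,
        ?_, ?_, ?_⟩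
      · rw [List.nodup_cons]
        exact ⟨fun hzd => (h4 z hzd).2 (List.mem_append_right _ (List.mem_singleton.mpr rfl)),
          h3⟩
      · rintro y hy
        rcases List.mem_cons.mp hy with rfl | hy'
        · exact ⟨List.mem_cons_self .., hz⟩
        · obtain ⟨hyl, hyn⟩ := h4 y hy'
          exact ⟨List.mem_cons_of_mem _ hyl, fun hc => hyn (List.mem_append_left _ hc)⟩
      · intro y hy
        rcases List.mem_cons.mp hy with rfl | hy'
        · rw [h2]
          exact List.mem_append_left _ (List.mem_append_right _ (List.mem_singleton.mpr rfl))
        · exact h5 y hy'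

theorem pvBfs_main (adj : PySem.Dict PvT3 (PySem.Set PvT3)) (U : List PvT3)
    (hadj : ∀ x y, y ∈ pvAdjGet adj x → y ∈ U) :
    ∀ (fuel : Nat) (q : List PvT3) (seen : PySem.Set PvT3),
      q.Nodup → (∀ x ∈ q, x ∈ seen) → seen.Nodup → (∀ x ∈ seen, x ∈ U) →
      (∀ x ∈ seen, x ∉ q → ∀ y, y ∈ pvAdjGet adj x → y ∈ seen) →
      q.length + (U.length - seen.length) ≤ fuel →
      ((∀ x ∈ seen, x ∈ pvBfs adj fuel q seen) ∧ (∀ x ∈ pvBfs adj fuel q seen, x ∈ U) ∧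
       (pvBfs adj fuel q seen).Nodup ∧
       (∀ x ∈ pvBfs adj fuel q seen, ∀ y, y ∈ pvAdjGet adj x → y ∈ pvBfs adj fuel q seen)) := by
  intro fuel
  induction fuel with
  | zero =>
    intro q seen hqnd hqs hsnd hsU hcl hm
    have hq : q = [] := by
      rw [← List.length_eq_zero_iff]
      omega
    subst hq
    rw [show pvBfs adj 0 [] seen = seen from rfl]
    exact ⟨fun x hx => hx, hsU, hsnd, fun x hx y hy => hcl x hx (List.not_mem_nil) y hy⟩
  | succ fuel ih =>
    intro q seen hqnd hqs hsnd hsU hcl hm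
    match q with
    | [] =>
      rw [show pvBfs adj (fuel + 1) [] seen = seen from rfl]
      exact ⟨fun x hx => hx, hsU, hsnd, fun x hx y hy => hcl x hx (List.not_mem_nil) y hy⟩
    | x :: q' =>
      obtain ⟨d, h1, h2, h3, h4, h5⟩ := pvBfs_inner (adj.getD x []) q' seen
      have hred : pvBfs adj (fuel + 1) (x :: q') seen = pvBfs adj fuel (q' ++ d) (seen ++ d) := by
        show pvBfs adj fuel _ _ = _
        rw [h1, h2]
      rw [hred]
      rw [h2] at h5
      rw [List.nodup_cons] at hqnd
      have hxseen : x ∈ seen := hqs x (List.mem_cons_self ..)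
      have hsU2 : ∀ z ∈ seen ++ d, z ∈ U := by
        intro z hz
        rcases List.mem_append.mp hz with hz | hz
        · exact hsU z hz
        · exact hadj x z (h4 z hz).1
      have hsnd2 : (seen ++ d).Nodup := by
        rw [List.nodup_append]
        exact ⟨hsnd, h3, fun z hz w hw => fun he => (h4 w hw).2 (he ▸ hz)⟩
      have hlen2 : (seen ++ d).length ≤ U.length := by
        have := (hsnd2.subperm hsU2).length_le
        simpa using this
      have hstep := ih (q' ++ d) (seen ++ d) ?_ ?_ hsnd2 hsU2 ?_ ?_
      case _ => exact ⟨fun z hz => hstep.1 z (List.mem_append_left _ hz),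
        hstep.2.1, hstep.2.2.1, hstep.2.2.2⟩
      · rw [List.nodup_append]
        exact ⟨hqnd.2, h3, fun z hz w hw he =>
          (h4 w hw).2 (he ▸ hqs z (List.mem_cons_of_mem _ hz))⟩
      · intro z hz
        rcases List.mem_append.mp hz with hz | hz
        · exact List.mem_append_left _ (hqs z (List.mem_cons_of_mem _ hz))
        · exact List.mem_append_right _ hz
      · intro z hz hznq y hy
        rcases List.mem_append.mp hz with hzs | hzd
        · by_cases hzx : z = x
          · subst hzx
            exact h5 y hy
          · have hznq' : z ∉ x :: q' := by
              intro hc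
              rcases List.mem_cons.mp hc with hc | hc
              · exact hzx hc
              · exact hznq (List.mem_append_left _ hc)
            exact List.mem_append_left _ (hcl z hzs hznq' y hy)
        · exact absurd (List.mem_append_right q' hzd) hznq
      · have hds : d.length + seen.length = (seen ++ d).length := by
          rw [List.length_append]; omega
        simp only [List.length_append, List.length_cons] at hm ⊢
        omega

theorem pvReach_mem {adj : PySem.Dict PvT3 (PySem.Set PvT3)} {r : List PvT3}
    (hclosed : ∀ x ∈ r, ∀ y, y ∈ pvAdjGet adj x → y ∈ r) {v y : PvT3} (hv : v ∈ r)
    (hreach : pvReach adj v y) : y ∈ r := by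
  induction hreach with
  | refl => exact hv
  | tail _ hr ih => exact hclosed _ ih _ hr

theorem pvIns3_sum (p q e : Int) :
    (pvIns3 p q e).1 + (pvIns3 p q e).2.1 + (pvIns3 p q e).2.2 = p + q + e := by
  rw [pvIns3]
  split_ifs <;> dsimp only <;> ring

theorem pvAdj_mem {n : Int} {x y : PvT3} (hx : x ∈ pvStates n) (hy : y ∈ pvNbr n x) :
    y ∈ pvAdjGet (pvFn n).2 x := by
  obtain ⟨h1, h2, h3⟩ := (mem_pvNbr hx y).mp hy
  exact ((pvFn_char n).2.2.2 x y).mpr ⟨hx, h1, fun he => h2 he.symm, h3⟩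

theorem pvDescent {n : Int} : ∀ (k : Nat) (y : PvT3), y ∈ pvStates n →
    (y.1 + y.2.1 + y.2.2).toNat = k → pvReach (pvFn n).2 y (0, 1, 2) := by
  intro k
  induction k using Nat.strong_induction_on with
  | _ k ihk =>
    intro y hy hk
    obtain ⟨h0, hn, hi⟩ := (mem_pvStates y).mp hy
    obtain ⟨a, b, c⟩ := y
    have h0' : 0 ≤ a := h0
    have hn' : c < n := hn
    have i1 : a < b := hi.1
    have i2 : b < c := hi.2
    by_cases hbase : c ≤ 2
    · have : ((a, b, c) : PvT3) = (0, 1, 2) := by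
        simp only [Prod.mk.injEq]
        omega
      rw [this]
      exact Relation.ReflTransGen.refl
    · have hc3 : 3 ≤ c := by omega
      have step : ∀ e : Int, 0 ≤ e → e < c → e ≠ a → e ≠ b →
          pvReach (pvFn n).2 (a, b, c) (0, 1, 2) := by
        intro e he0 hec hea heb
        have hein : e ∈ pvOthers n a b c := mem_pvOthers.mpr
          ⟨he0, by omega, hea, heb, by omega⟩
        have hynbr : pvIns3 a b e ∈ pvNbr n ((a, b, c) : PvT3) := by
          rw [pvNbr]
          exact List.mem_append_left _ (List.mem_map.mpr ⟨e, hein, rfl⟩)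
        have hadj := pvAdj_mem hy hynbr
        have hy' : pvIns3 a b e ∈ pvStates n := ((mem_pvNbr hy _).mp hynbr).1
        have hsum := pvIns3_sum a b e
        refine Relation.ReflTransGen.head hadj (ihk ((pvIns3 a b e).1 +
          (pvIns3 a b e).2.1 + (pvIns3 a b e).2.2).toNat ?_ _ hy' rfl)
        rw [hsum]
        have : ((a, b, c) : PvT3).1 + ((a, b, c) : PvT3).2.1 + ((a, b, c) : PvT3).2.2
            = a + b + c := rfl
        omega
      by_cases hA : a = 0
      · by_cases hB : b = 1
        · exact step 2 (by omega) (by omega) (by omega) (by omega)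
        · exact step 1 (by omega) (by omega) (by omega) (by omega)
      · exact step 0 (by omega) (by omega) (by omega) (by omega)

theorem pvAdj_symm (n : Int) : Symmetric (fun x y => y ∈ pvAdjGet (pvFn n).2 x) := by
  intro x y h
  obtain ⟨hx, hy, hne, hC⟩ := ((pvFn_char n).2.2.2 x y).mp h
  exact ((pvFn_char n).2.2.2 y x).mpr ⟨hy, hx, hne.symm,
    (pvInterLen_symm (pvIncr_of_mem hy) (pvIncr_of_mem hx)).trans hC⟩

theorem pvReach_all {n : Int} {x y : PvT3} (hx : x ∈ pvStates n) (hy : y ∈ pvStates n) :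
    pvReach (pvFn n).2 x y := by
  have h1 := pvDescent _ x hx rfl
  have h2 := pvDescent _ y hy rfl
  exact h1.trans (Relation.ReflTransGen.symmetric (pvAdj_symm n) h2)

theorem pvStates_nil {n : Int} (h : n < 3) : pvStates n = [] := by
  have hl := len_pvStates n
  rw [show n.toNat - 2 = 0 from by omega, Nat.mul_zero] at hl
  rw [← List.length_eq_zero_iff]
  omega

theorem pvCCskip (adj : PySem.Dict PvT3 (PySem.Set PvT3)) (flen : Nat) :
    ∀ (l : List PvT3) (seen : PySem.Set PvT3) (c : Int), (∀ v ∈ l, v ∈ seen) →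
    (l.foldl (fun (p : PySem.Set PvT3 × Int) v =>
      if PySem.Set.contains p.1 v = true then p
      else (pvBfs adj flen [v] (PySem.Set.add p.1 v), p.2 + 1)) (seen, c)) = (seen, c)
  | [], seen, c, _ => rfl
  | v :: l, seen, c, h => by
      rw [List.foldl_cons, if_pos ((PySem.Set.contains_iff seen v).mpr
        (h v (List.mem_cons_self ..)))]
      exact pvCCskip adj flen l seen c (fun w hw => h w (List.mem_cons_of_mem _ hw))

set_option maxHeartbeats 1000000 in
theorem pvCC (n : Int) : pvConnectedComponents (pvFn n) = if 3 ≤ n then 1 else 0 := by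
  rw [pvConnectedComponents, (pvFn_char n).1]
  by_cases h3 : 3 ≤ n
  · rw [if_pos h3]
    obtain ⟨v0, rest, hsr⟩ : ∃ v0 rest, pvStates n = v0 :: rest := by
      cases hs : pvStates n with
      | nil =>
        have hmem : ((0, 1, 2) : PvT3) ∈ pvStates n :=
          (mem_pvStates _).mpr ⟨by norm_num, by show (2 : Int) < n; omega,
            by exact ⟨by norm_num, by norm_num⟩⟩
        rw [hs] at hmem
        exact absurd hmem (List.not_mem_nil)
      | cons a l => exact ⟨a, l, rfl⟩
    have hv0 : v0 ∈ pvStates n := hsr ▸ List.mem_cons_self ..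
    have hlenU : rest.length + 1 = (pvStates n).length := by rw [hsr]; rfl
    rw [hsr, List.foldl_cons]
    have hcontains : PySem.Set.contains ([] : PySem.Set PvT3) v0 = false := rfl
    rw [if_neg (by rw [hcontains]; exact Bool.false_ne_true)]
    have hadd : PySem.Set.add ([] : PySem.Set PvT3) v0 = [v0] := rfl
    rw [hadd]
    have hbfs := pvBfs_main (pvFn n).2 (pvStates n)
      (fun x y hy => (((pvFn_char n).2.2.2 x y).mp hy).2.1)
      ((v0 :: rest).length + 1) [v0] [v0]
      (List.nodup_cons.mpr ⟨List.not_mem_nil, List.nodup_nil⟩)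
      (fun x hx => hx) (List.nodup_cons.mpr ⟨List.not_mem_nil, List.nodup_nil⟩)
      (fun x hx => (List.mem_singleton.mp hx).symm ▸ hv0)
      (fun x hx hnq => absurd hx hnq)
      (by
        rw [← hlenU]
        show 1 + ((rest.length + 1) - 1) ≤ rest.length + 1 + 1
        omega)
    obtain ⟨c1, c2, c3, c4⟩ := hbfs
    set r := pvBfs (pvFn n).2 ((v0 :: rest).length + 1) [v0] [v0] with hr
    have hall : ∀ v ∈ pvStates n, v ∈ r := by
      intro v hv
      exact pvReach_mem c4 (c1 v0 (List.mem_singleton.mpr rfl)) (pvReach_all hv0 hv)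
    rw [show ((([] : PySem.Set PvT3), (0 : Int)).2 + 1 : Int) = 1 from rfl,
      pvCCskip _ _ rest r 1 (fun v hv => hall v (hsr ▸ List.mem_cons_of_mem _ hv))]
  · rw [if_neg h3, pvStates_nil (by omega), List.foldl_nil]

theorem pvEdgeSum_eq (n : Int) :
    pvEdgeSum (pvFn n) = ((pvStates n).length : Int) * (3 * (n - 3)) := by
  rw [pvEdgeSum]
  have hkeys := (pvFn_char n).2.1
  have hknd : (pvFn n).2.keys.Nodup := by rw [hkeys]; exact nodup_pvStates n
  rw [PySem.Dict.values_eq_map_keys _ hknd ([] : PySem.Set PvT3), hkeys, List.map_map]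
  have hmap : (pvStates n).map ((fun v => PySem.Set.len v) ∘ fun k => (pvFn n).2.getD k [])
      = (pvStates n).map (fun _ => 3 * (n - 3)) := by
    apply List.map_congr_left
    intro x hx
    exact pvDegree hx
  rw [hmap, PySem.List.sum_map_const_int]

theorem pvV_eq {n : Int} (h3 : 3 ≤ n) :
    ((pvStates n).length : Int) = PySem.Int.floordiv (n * (n - 1) * (n - 2)) 6 := by
  have h := len_pvStates n
  have hm : ((n.toNat : Int)) = n := Int.toNat_of_nonneg (by omega)
  have h1 : 1 ≤ n.toNat := by omega
  have h2 : 2 ≤ n.toNat := by omega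
  have hcast : n * (n - 1) * (n - 2) = ((6 * (pvStates n).length : Nat) : Int) := by
    calc n * (n - 1) * (n - 2)
        = (n.toNat : Int) * ((n.toNat : Int) - 1) * ((n.toNat : Int) - 2) := by rw [hm]
      _ = ((n.toNat * (n.toNat - 1) * (n.toNat - 2) : Nat) : Int) := by
          rw [Nat.cast_mul, Nat.cast_mul, Nat.cast_sub h1, Nat.cast_sub h2]
          norm_num
      _ = ((6 * (pvStates n).length : Nat) : Int) := by rw [h]
  rw [PySem.Int.floordiv_eq_ediv_of_pos (by norm_num), hcast]
  push_cast
  rw [Int.mul_ediv_cancel_left _ (by norm_num : (6 : Int) ≠ 0)]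

-- ===== VERDICT (by name: the statement is the Claim_ definition above) =====
theorem bounded_pachner_enumeration_spec : Claim_equal_bounded_pachner_enumeration := by
  intro n _
  show bounded_pachner_enumeration n = bounded_pachner_enumeration_alt n
  have hVeq : PySem.Set.len (pvFn n).1
      = (if 3 ≤ n then PySem.Int.floordiv (n * (n - 1) * (n - 2)) 6 else 0) := by
    have hV : PySem.Set.len (pvFn n).1 = ((pvStates n).length : Int) := by
      rw [PySem.Set.len, (pvFn_char n).1]
    by_cases h3 : 3 ≤ n
    · rw [if_pos h3, hV, pvV_eq h3]
    · rw [if_neg h3, hV, pvStates_nil (by omega)]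
      rfl
  have hVB : (if 3 ≤ n then PySem.Int.floordiv (n * (n - 1) * (n - 2)) 6 else 0)
      = ((pvStates n).length : Int) := by
    rw [← hVeq, PySem.Set.len, (pvFn_char n).1]
  have hEeq : PySem.Int.floordiv (pvEdgeSum (pvFn n)) 2
      = PySem.Int.floordiv ((if 3 ≤ n then PySem.Int.floordiv (n * (n - 1) * (n - 2)) 6
        else 0) * 3 * (n - 3)) 2 := by
    rw [pvEdgeSum_eq, hVB]
    congr 1
    ring
  have hCeq : pvConnectedComponents (pvFn n) = (if 3 ≤ n then (1 : Int) else 0) := pvCC n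
  simp only [bounded_pachner_enumeration, bounded_pachner_enumeration_alt, pvCycleRank,
    hVeq, hEeq, hCeq]
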